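-- pv_equiv track=rewrite | github.com/Praneet2126/myCommunity | sentiment_analysis/message_tagger/tagger.py | _find_partial_matches
-- ===== SOURCE A (Python) =====
-- from typing import List, Dict, Set
--
-- def _find_partial_matches(text: str, keywords: Set[str]) -> List[str]:
--     """Find keywords that match (partially or fully) in the text.
--
--     Supports two types of matching:
--     1. Full keyword appears in text (e.g., "baga beach" in "I love baga beach")
--     2. Any word from keyword appears in text (e.g., "baga" from "baga beach" in "Baga is crowded")
--
--     Args:
--         text: Normalized text to search in
--         keywords: Set of normalized keywords to match against
--
--     Returns:
--         List of matched keywords (in original case from config)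
--     """
--     matches = []
--
--     # Split text into words for word-based matching
--     text_words = set(text.split())
--
--     for keyword in keywords:
--         # Check if full keyword appears in text
--         if keyword in text:
--             matches.append(keyword)
--         else:
--             # Check if any word from keyword appears in text
--             keyword_words = keyword.split()
--             for word in keyword_words:
--                 # Only match if word is significant (length > 2 to avoid matching "is", "at", etc.)
--                 if len(word) > 2 and word in text_words:
--                     matches.append(keyword)
--                     break  # Found a match, no need to check other words
--
--     return matches
-- ===== SOURCE B (Python) =====
-- from typing import List, Set
--
-- def _find_partial_matches(text: str, keywords: Set[str]) -> List[str]: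
--     """Staged inverted-index approach: build a map from each significant
--     (length > 2) keyword word to the keywords containing it, collect the
--     word-matched keywords by a single pass over the text's words, then keep
--     keywords (in order) that occur as a substring of text or were word-hit."""
--     index = {}
--     for w, kw in ((w, kw) for kw in keywords for w in kw.split() if len(w) > 2):
--         index.setdefault(w, []).append(kw)
--     hit = set()
--     for w in text.split():
--         hit.update(index.get(w, ()))
--     return [kw for kw in keywords if kw in text or kw in hit]
-- ===== Notes on version B (the rewrite author's own statement) =====
-- stated objective: alternative
-- what changed: B inverts the word matching: instead of A's per-keyword scan of the keyword's words against the text word set, B builds an inverted index from significant keyword words to their keywords, collects word hits in a single pass over the text's words, and finally filters keywords by substring test or hit-set membership.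
import Mathlib
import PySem

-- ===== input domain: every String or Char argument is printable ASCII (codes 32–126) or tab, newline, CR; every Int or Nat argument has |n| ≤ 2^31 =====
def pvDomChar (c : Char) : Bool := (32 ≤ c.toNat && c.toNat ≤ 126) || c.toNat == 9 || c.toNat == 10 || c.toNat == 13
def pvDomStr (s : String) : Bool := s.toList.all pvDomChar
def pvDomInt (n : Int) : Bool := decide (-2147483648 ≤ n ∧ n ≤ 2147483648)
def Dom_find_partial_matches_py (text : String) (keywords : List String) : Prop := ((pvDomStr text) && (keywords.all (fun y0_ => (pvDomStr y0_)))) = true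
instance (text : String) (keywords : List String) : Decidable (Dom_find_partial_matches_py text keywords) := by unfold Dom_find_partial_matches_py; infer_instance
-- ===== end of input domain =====

-- B replaces A's per-keyword inner word scan by a staged inverted index
-- (significant keyword word -> keywords) queried by one pass over the text's
-- words, then a final filter in keyword order (objective: alternative).

-- ===== PORT A =====
-- A's inner 'for word in keyword_words: if len(word) > 2 and word in text_words: append; break'
def pvAWordLoop (tw : PySem.Set String) (kw : String) (ms : List String) : List String → List String
  | [] => ms
  | w :: rest =>
      if decide (2 < PySem.Str.len w) && PySem.Set.contains tw w then ms ++ [kw]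
      else pvAWordLoop tw kw ms rest

def find_partial_matches_py (text : String) (keywords : List String) : List String :=
  let text_words : PySem.Set String := PySem.Set.ofList (PySem.Str.split₀ text)
  keywords.foldl
    (fun ms kw =>
      if PySem.Str.isIn kw text then ms ++ [kw]
      else pvAWordLoop text_words kw ms (PySem.Str.split₀ kw)) []

-- ===== PORT B =====
-- the (word, keyword) pairs generator: significant words of each keyword
def pvPairs (keywords : List String) : List (String × String) :=
  keywords.flatMap (fun kw =>
    ((PySem.Str.split₀ kw).filter (fun w => decide (2 < PySem.Str.len w))).map (fun w => (w, kw)))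

def find_partial_matches_py_alt (text : String) (keywords : List String) : List String :=
  -- index.setdefault(w, []).append(kw) over the pairs generator
  let index : PySem.Dict String (List String) :=
    (pvPairs keywords).foldl (fun d p => d.modify p.1 [] (fun l => l ++ [p.2])) PySem.Dict.empty
  -- hit.update(index.get(w, ())) for each word of the text
  let hit : PySem.Set String :=
    (PySem.Str.split₀ text).foldl (fun s w => PySem.Set.update s (index.getD w [])) PySem.Set.empty
  keywords.filter (fun kw => PySem.Str.isIn kw text || PySem.Set.contains hit kw)

-- ===== PRECONDITION & SPEC =====
def Spec_find_partial_matches_py (text : String) (keywords : List String) (out : List String) : Prop := out = find_partial_matches_py_alt text keywords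
instance (text : String) (keywords : List String) (out : List String) : Decidable (Spec_find_partial_matches_py text keywords out) := by unfold Spec_find_partial_matches_py; infer_instance

-- ===== CLAIM (what is proved, stated in full; the proofs are below) =====
def Claim_equal_find_partial_matches_py : Prop := ∀ (text : String) (keywords : List String), Dom_find_partial_matches_py text keywords → Spec_find_partial_matches_py text keywords (find_partial_matches_py text keywords)

-- ===== LEMMAS AND PROOFS =====

-- A's inner word loop appends kw exactly when some word of ws is significant and in tw
lemma pvAWordLoop_eq (tw : PySem.Set String) (kw : String) (ms : List String) (ws : List String) :
    pvAWordLoop tw kw ms ws =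
      ms ++ (if ws.any (fun w => decide (2 < PySem.Str.len w) && PySem.Set.contains tw w) then [kw] else []) := by
  induction ws with
  | nil => simp [pvAWordLoop]
  | cons w rest ih =>
      simp only [pvAWordLoop]
      rw [List.any_cons]
      by_cases hb : (decide (2 < PySem.Str.len w) && PySem.Set.contains tw w) = true
      · rw [if_pos hb, hb, Bool.true_or, if_pos rfl]
      · have hb' : (decide (2 < PySem.Str.len w) && PySem.Set.contains tw w) = false :=
          Bool.eq_false_iff.mpr hb
        rw [if_neg hb, ih, hb', Bool.false_or]

-- A's fold is a filter by the "substring or some significant word in tw" predicate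
lemma pvAFold_eq (text : String) (tw : PySem.Set String) (keywords : List String) (ms : List String) :
    keywords.foldl
      (fun ms kw =>
        if PySem.Str.isIn kw text then ms ++ [kw]
        else pvAWordLoop tw kw ms (PySem.Str.split₀ kw)) ms =
      ms ++ keywords.filter
        (fun kw => PySem.Str.isIn kw text ||
          (PySem.Str.split₀ kw).any (fun w => decide (2 < PySem.Str.len w) && PySem.Set.contains tw w)) := by
  induction keywords generalizing ms with
  | nil => simp
  | cons kw rest ih =>
      rw [List.foldl_cons, List.filter_cons]
      by_cases h : PySem.Str.isIn kw text = true
      · rw [if_pos h, ih, if_pos (by rw [h, Bool.true_or]), List.append_assoc, List.singleton_append]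
      · have hf : PySem.Str.isIn kw text = false := Bool.eq_false_iff.mpr h
        rw [if_neg h, pvAWordLoop_eq, ih]
        cases ha : (PySem.Str.split₀ kw).any
            (fun w => decide (2 < PySem.Str.len w) && PySem.Set.contains tw w) with
        | true =>
            rw [if_pos rfl, if_pos (by simp), List.append_assoc,
              List.singleton_append]
        | false =>
            have hm : (PySem.Str.isIn kw text || (PySem.Str.split₀ kw).any
                (fun w => decide (2 < PySem.Str.len w) && PySem.Set.contains tw w)) = false := by
              rw [hf, ha, Bool.false_or]
            rw [if_neg Bool.false_ne_true, if_neg (by rw [Bool.or_false]; exact h), List.append_nil]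

-- membership in the pairs generator
lemma pvMem_pairs (keywords : List String) (w kw : String) :
    (w, kw) ∈ pvPairs keywords ↔ kw ∈ keywords ∧ w ∈ PySem.Str.split₀ kw ∧ 2 < PySem.Str.len w := by
  simp only [pvPairs, List.mem_flatMap, List.mem_map, List.mem_filter, Prod.mk.injEq,
    decide_eq_true_eq]
  constructor
  · rintro ⟨k, hk, x, ⟨hx, hlen⟩, hw, rfl⟩
    exact ⟨hk, hw ▸ hx, hw ▸ hlen⟩
  · rintro ⟨hk, hw, hlen⟩
    exact ⟨kw, hk, w, ⟨hw, hlen⟩, rfl, rfl⟩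

-- membership in the built index: exactly the pairs with that word
lemma pvMem_index (keywords : List String) (w kw : String) :
    kw ∈ ((pvPairs keywords).foldl
        (fun d p => d.modify p.1 [] (fun l => l ++ [p.2])) PySem.Dict.empty).getD w [] ↔
      (w, kw) ∈ pvPairs keywords := by
  rw [PySem.Dict.getD_foldl_modify_append, PySem.Dict.getD_empty, List.nil_append]
  simp only [List.mem_map, List.mem_filter, beq_iff_eq]
  constructor
  · rintro ⟨⟨pw, pk⟩, ⟨hp, rfl⟩, rfl⟩
    exact hp
  · intro hp
    exact ⟨(w, kw), ⟨hp, rfl⟩, rfl⟩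

-- membership in the hit-collecting fold over the text's words
lemma pvMem_hitFold (g : String → List String) (ws : List String) (s : PySem.Set String) (kw : String) :
    kw ∈ ws.foldl (fun s w => PySem.Set.update s (g w)) s ↔ kw ∈ s ∨ ∃ w ∈ ws, kw ∈ g w := by
  induction ws generalizing s with
  | nil => simp
  | cons w rest ih =>
      rw [List.foldl_cons, ih, PySem.Set.mem_update]
      constructor
      · rintro (⟨hs | hg⟩ | ⟨x, hx, hgx⟩)
        · exact Or.inl hs
        · exact Or.inr ⟨w, List.mem_cons_self, hg⟩
        · exact Or.inr ⟨x, List.mem_cons_of_mem _ hx, hgx⟩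
      · rintro (hs | ⟨x, hx, hgx⟩)
        · exact Or.inl (Or.inl hs)
        · rcases List.mem_cons.mp hx with rfl | hx'
          · exact Or.inl (Or.inr hgx)
          · exact Or.inr ⟨x, hx', hgx⟩

-- for kw among the keywords, B's hit set holds kw iff A's word test fires
lemma pvHit_eq_any (text : String) (keywords : List String) (kw : String) (hkw : kw ∈ keywords) :
    PySem.Set.contains
        ((PySem.Str.split₀ text).foldl
          (fun s w => PySem.Set.update s
            (((pvPairs keywords).foldl
              (fun d p => d.modify p.1 [] (fun l => l ++ [p.2])) PySem.Dict.empty).getD w []))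
          PySem.Set.empty) kw =
      (PySem.Str.split₀ kw).any
        (fun w => decide (2 < PySem.Str.len w) &&
          PySem.Set.contains (PySem.Set.ofList (PySem.Str.split₀ text)) w) := by
  by_cases h : kw ∈ (PySem.Str.split₀ text).foldl
      (fun s w => PySem.Set.update s
        (((pvPairs keywords).foldl
          (fun d p => d.modify p.1 [] (fun l => l ++ [p.2])) PySem.Dict.empty).getD w []))
      PySem.Set.empty
  · rw [(PySem.Set.contains_iff _ _).mpr h]
    rcases (pvMem_hitFold _ _ _ _).mp h with hs | ⟨w, hwt, hidx⟩
    · simp [PySem.Set.empty] at hs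
    · have := (pvMem_pairs keywords w kw).mp ((pvMem_index keywords w kw).mp hidx)
      symm
      rw [List.any_eq_true]
      refine ⟨w, this.2.1, ?_⟩
      rw [Bool.and_eq_true, decide_eq_true_eq]
      exact ⟨this.2.2, (PySem.Set.contains_iff _ _).mpr (by
        rw [PySem.Set.mem_ofList]; exact hwt)⟩
  · have hc : PySem.Set.contains ((PySem.Str.split₀ text).foldl
        (fun s w => PySem.Set.update s
          (((pvPairs keywords).foldl
            (fun d p => d.modify p.1 [] (fun l => l ++ [p.2])) PySem.Dict.empty).getD w []))
        PySem.Set.empty) kw = false := by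
      rw [Bool.eq_false_iff]; intro hcon; exact h ((PySem.Set.contains_iff _ _).mp hcon)
    rw [hc]
    symm
    rw [List.any_eq_false]
    intro w hw hcon
    rw [Bool.and_eq_true, decide_eq_true_eq] at hcon
    apply h
    refine (pvMem_hitFold _ _ _ _).mpr (Or.inr ⟨w, ?_, ?_⟩)
    · have := (PySem.Set.contains_iff _ _).mp hcon.2
      rwa [PySem.Set.mem_ofList] at this
    · exact (pvMem_index keywords w kw).mpr
        ((pvMem_pairs keywords w kw).mpr ⟨hkw, hw, hcon.1⟩)

-- ===== VERDICT (by name: the statement is the Claim_ definition above) =====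
theorem find_partial_matches_py_spec : Claim_equal_find_partial_matches_py := by
  intro text keywords _
  unfold Spec_find_partial_matches_py find_partial_matches_py find_partial_matches_py_alt
  rw [pvAFold_eq, List.nil_append]
  exact List.filter_congr (fun kw hkw => by rw [pvHit_eq_any text keywords kw hkw])
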